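-- pv_equiv track=rewrite | github.com/kacpercwiertnia/introduction_to_computer_science_course | Zbiór2/Zadanie13.py | czy_unikalna
-- ===== SOURCE A (Python) =====
-- def czy_unikalna(n):
--   cyfra = n%10
--   n//= 10
--   while n > 0:
--     if cyfra == n%10:
--       return False
--     n//=10
--   return True
-- ===== SOURCE B (Python) =====
-- def czy_unikalna(n):
--     if n < 10:
--         return True
--     s = str(n)
--     counts = {}
--     for ch in s:
--         counts[ch] = counts.get(ch, 0) + 1
--     return counts[s[-1]] == 1
-- ===== Notes on version B (the rewrite author's own statement) =====
-- stated objective: alternative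
-- what changed: Replaces A's early-exit digit-arithmetic comparison loop with a table-based method: after guarding the degenerate single-digit/non-positive inputs, B builds a frequency table of the characters of str(n) in one pass and answers by looking up the count of the last character.
import Mathlib
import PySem

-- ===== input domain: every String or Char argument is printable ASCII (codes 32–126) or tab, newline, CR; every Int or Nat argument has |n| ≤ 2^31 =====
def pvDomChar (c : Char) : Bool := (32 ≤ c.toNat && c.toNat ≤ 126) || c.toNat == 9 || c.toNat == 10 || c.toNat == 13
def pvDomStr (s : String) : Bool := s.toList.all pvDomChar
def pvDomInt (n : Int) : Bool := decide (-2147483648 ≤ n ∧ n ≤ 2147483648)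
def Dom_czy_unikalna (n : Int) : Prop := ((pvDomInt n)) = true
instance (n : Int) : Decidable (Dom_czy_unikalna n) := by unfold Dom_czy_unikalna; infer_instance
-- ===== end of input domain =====

-- B replaces A's early-exit digit-comparison loop by a one-pass character-frequency
-- table of str(n) followed by a lookup of the last character's count (objective: alternative).

-- ===== PORT A =====
-- the 'while n > 0' loop of A, carrying cyfra and the shrinking n
def czyLoop (cyfra n : Int) : Bool :=
  if _h : 0 < n then
    if cyfra = PySem.Int.mod n 10 then false
    else czyLoop cyfra (PySem.Int.floordiv n 10)
  else true
termination_by n.toNat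
decreasing_by
  rw [PySem.Int.floordiv_eq_ediv_of_pos (by norm_num : (0:Int) < 10)]
  omega

def czy_unikalna (n : Int) : Bool :=
  czyLoop (PySem.Int.mod n 10) (PySem.Int.floordiv n 10)

-- ===== PORT B =====
-- counts[s[-1]] never raises in the Python (s[-1] is always a key of counts), so getD … 0
-- is exact here; pyGetD with a default is exact too since str(n) is never empty.
def czy_unikalna_alt (n : Int) : Bool :=
  if n < 10 then true
  else
    let s := PySem.Int.toChars n
    let counts := s.foldl (fun d ch => d.insert ch (d.getD ch 0 + 1))
                    (PySem.Dict.empty : PySem.Dict Char Int)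
    counts.getD (PySem.List.pyGetD s (-1) '0') 0 == 1

-- ===== PRECONDITION & SPEC =====
def Spec_czy_unikalna (n : Int) (out : Bool) : Prop := out = czy_unikalna_alt n
instance (n : Int) (out : Bool) : Decidable (Spec_czy_unikalna n out) := by unfold Spec_czy_unikalna; infer_instance

-- ===== CLAIM (what is proved, stated in full; the proofs are below) =====
def Claim_equal_czy_unikalna : Prop := ∀ (n : Int), Dom_czy_unikalna n → Spec_czy_unikalna n (czy_unikalna n)

-- ===== LEMMAS AND PROOFS =====

lemma toDigitsCore_append (b : Nat) : ∀ (f n : Nat) (l : List Char),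
    Nat.toDigitsCore b f n l = Nat.toDigitsCore b f n [] ++ l := by
  intro f
  induction f with
  | zero => intro n l; simp [Nat.toDigitsCore]
  | succ f ih =>
    intro n l
    simp only [Nat.toDigitsCore]
    by_cases h : n / b = 0
    · simp [h]
    · simp only [h, if_false]
      rw [ih (n / b) (_ :: l), ih (n / b) [_]]
      simp
lemma toDigitsCore_fuel : ∀ (n f1 f2 : Nat) (l : List Char), n < f1 → n < f2 →
    Nat.toDigitsCore 10 f1 n l = Nat.toDigitsCore 10 f2 n l := by
  intro n
  induction n using Nat.strong_induction_on with
  | _ n ih =>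
    intro f1 f2 l h1 h2
    match f1, f2 with
    | f1 + 1, f2 + 1 =>
      simp only [Nat.toDigitsCore]
      by_cases h : n / 10 = 0
      · simp [h]
      · simp only [h, if_false]
        have hlt : n / 10 < n := Nat.div_lt_self (by omega) (by omega)
        exact ih (n / 10) hlt _ _ _ (by omega) (by omega)
lemma toDigits_small {m : Nat} (h : m < 10) : Nat.toDigits 10 m = [Nat.digitChar m] := by
  simp [Nat.toDigits, Nat.toDigitsCore, Nat.div_eq_of_lt h, Nat.mod_eq_of_lt h]
lemma toDigits_rec {m : Nat} (h : 10 ≤ m) :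
    Nat.toDigits 10 m = Nat.toDigits 10 (m / 10) ++ [Nat.digitChar (m % 10)] := by
  have h0 : m / 10 ≠ 0 := by omega
  conv_lhs => rw [Nat.toDigits]
  rw [show m + 1 = (m) + 1 from rfl]
  simp only [Nat.toDigitsCore, h0, if_false]
  rw [toDigitsCore_append]
  rw [toDigitsCore_fuel (m / 10) m (m / 10 + 1) [] (by omega) (by omega)]
  rfl

lemma digitChar_inj : ∀ c < 10, ∀ m < 10, (Nat.digitChar c = Nat.digitChar m ↔ c = m) := by
  decide

lemma czyLoop_eq_mem : ∀ (m c : Nat), 0 < m → c < 10 →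
    czyLoop (c : Int) (m : Int) = ! decide (Nat.digitChar c ∈ Nat.toDigits 10 m) := by
  intro m
  induction m using Nat.strong_induction_on with
  | _ m ih =>
    intro c hm hc
    rw [czyLoop]
    have hpos : (0:Int) < (m:Int) := by exact_mod_cast hm
    rw [dif_pos hpos]
    have hmod : PySem.Int.mod (↑m) 10 = ((m % 10 : Nat) : Int) := by exact_mod_cast PySem.Int.mod_natCast m 10
    rw [hmod]
    by_cases hceq : c = m % 10
    · rw [if_pos (by exact_mod_cast congrArg (Nat.cast (R := Int)) hceq)]
      have hmem : Nat.digitChar c ∈ Nat.toDigits 10 m := by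
        by_cases h10 : m < 10
        · rw [toDigits_small h10, hceq, Nat.mod_eq_of_lt h10]; simp
        · rw [toDigits_rec (by omega), hceq]; simp
      simp [hmem]
    · rw [if_neg (by exact_mod_cast fun h => hceq (by exact_mod_cast h))]
      have hdiv : PySem.Int.floordiv (↑m) 10 = ((m / 10 : Nat) : Int) := by exact_mod_cast PySem.Int.floordiv_natCast m 10
      rw [hdiv]
      by_cases h10 : m < 10
      · have : m / 10 = 0 := Nat.div_eq_of_lt h10
        rw [this]
        rw [czyLoop]
        rw [dif_neg (by norm_num)]
        rw [toDigits_small h10]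
        have : ¬ Nat.digitChar c = Nat.digitChar m := by
          rw [digitChar_inj c hc m h10]
          omega
        simp [this]
      · have hq : 0 < m / 10 := Nat.div_pos (by omega) (by omega)
        rw [ih (m / 10) (Nat.div_lt_self hm (by omega)) c hq hc]
        conv_rhs => rw [toDigits_rec (show 10 ≤ m by omega)]
        have : ¬ Nat.digitChar c = Nat.digitChar (m % 10) := by
          rw [digitChar_inj c hc (m % 10) (Nat.mod_lt m (by omega))]
          exact hceq
        simp [this]

theorem czy_unikalna_spec_aux : ∀ (n : Int), czy_unikalna n = czy_unikalna_alt n := by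
  intro n
  by_cases hn : n < 10
  · unfold czy_unikalna czy_unikalna_alt
    rw [if_pos hn]
    have h2 : ¬ (0 < PySem.Int.floordiv n 10) := by
      rw [PySem.Int.floordiv_eq_ediv_of_pos (by norm_num : (0:Int) < 10)]; omega
    rw [czyLoop, dif_neg h2]
  · rw [not_lt] at hn
    lift n to Nat using (by omega) with m
    have hm : 10 ≤ m := by exact_mod_cast hn
    unfold czy_unikalna czy_unikalna_alt
    have hmod : PySem.Int.mod (↑m) 10 = ((m % 10 : Nat) : Int) := by
      exact_mod_cast PySem.Int.mod_natCast m 10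
    have hdiv : PySem.Int.floordiv (↑m) 10 = ((m / 10 : Nat) : Int) := by
      exact_mod_cast PySem.Int.floordiv_natCast m 10
    rw [hmod, hdiv, czyLoop_eq_mem (m / 10) (m % 10) (Nat.div_pos hm (by omega)) (Nat.mod_lt m (by omega))]
    rw [if_neg (by exact_mod_cast not_lt.2 hn)]
    have hchars : PySem.Int.toChars (↑m : Int) = Nat.toDigits 10 m := by
      simp [PySem.Int.toChars, show ¬((m:Int) < 0) by omega]
    rw [hchars, toDigits_rec hm]
    dsimp only
    rw [PySem.List.pyGetD_neg_one_append_singleton]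
    rw [PySem.Dict.getD_foldl_insert_add_one, PySem.Dict.getD_empty]
    rw [List.count_append, List.count_cons_self, List.count_nil]
    by_cases hmem : (m % 10).digitChar ∈ Nat.toDigits 10 (m / 10)
    · have hcp : 0 < (Nat.toDigits 10 (m / 10)).count (m % 10).digitChar :=
        List.count_pos_iff.2 hmem
      simp only [decide_eq_true hmem, Bool.not_true]
      symm
      rw [beq_eq_false_iff_ne]
      push_cast
      omega
    · have hcp : (Nat.toDigits 10 (m / 10)).count (m % 10).digitChar = 0 :=
        List.count_eq_zero.2 hmem
      simp [hcp, decide_eq_false hmem]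

-- ===== VERDICT (by name: the statement is the Claim_ definition above) =====
theorem czy_unikalna_spec : Claim_equal_czy_unikalna := by
  intro n _
  exact czy_unikalna_spec_aux n
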